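-- pv_equiv track=rewrite | github.com/Joshuaisikah/Python_decryption | function.py | transpose_and_extract_text
-- ===== SOURCE A (Python) =====
-- def transpose_and_extract_text(array):
--     # Transpose the array
--     transposed_array = list(map(list, zip(*array)))
--
--     # Form a sentence from the transposed array
--     sentence = ''
--     for row in transposed_array:
--         for element in row:
--             if element == '0':
--                 sentence += ' '
--             elif element != '&':
--                 sentence += element
--
--     return sentence
-- ===== SOURCE B (Python) =====
-- def transpose_and_extract_text(array):
--     # Row-major single pass filling per-column accumulators (no transpose,
--     # no column-major walk); min row length reproduces zip's truncation.
--     cols = min((len(r) for r in array), default=0)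
--     buckets = [''] * cols
--     for r in array:
--         for j in range(cols):
--             e = r[j]
--             if e == '0':
--                 buckets[j] += ' '
--             elif e != '&':
--                 buckets[j] += e
--     return ''.join(buckets)
-- ===== Notes on version B (the rewrite author's own statement) =====
-- stated objective: alternative
-- what changed: B never transposes and never walks column-major: a single row-major pass fills per-column string accumulators (buckets indexed by column, bounded by the minimum row length), which are joined once at the end.
import Mathlib
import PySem

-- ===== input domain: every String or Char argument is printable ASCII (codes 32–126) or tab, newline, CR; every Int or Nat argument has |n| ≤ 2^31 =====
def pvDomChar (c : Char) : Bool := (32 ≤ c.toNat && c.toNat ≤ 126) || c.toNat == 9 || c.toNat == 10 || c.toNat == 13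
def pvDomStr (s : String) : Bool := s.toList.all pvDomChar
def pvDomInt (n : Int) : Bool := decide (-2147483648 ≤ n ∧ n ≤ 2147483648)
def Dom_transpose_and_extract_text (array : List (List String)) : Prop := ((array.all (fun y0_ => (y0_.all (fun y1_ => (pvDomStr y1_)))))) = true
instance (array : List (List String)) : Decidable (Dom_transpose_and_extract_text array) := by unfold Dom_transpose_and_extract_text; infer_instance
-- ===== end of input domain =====

-- B never transposes and never walks column-major: a single row-major pass fills
-- per-column string accumulators (buckets), joined once at the end.

-- ===== PORT A =====
-- heads of all rows (none if any row is empty): one step of Python's zip(*array)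
def pvHeads? : List (List String) → Option (List String)
  | [] => some []
  | [] :: _ => none
  | (a :: _) :: rs => (pvHeads? rs).map (a :: ·)

theorem pvHeads?_some_ne_nil {rows : List (List String)} {hs : List String}
    (h : pvHeads? rows = some hs) : ∀ r ∈ rows, r ≠ [] := by
  induction rows generalizing hs with
  | nil => intro r hr; cases hr
  | cons x xs ih =>
    cases x with
    | nil => simp [pvHeads?] at h
    | cons a as =>
      simp only [pvHeads?, Option.map_eq_some_iff] at h
      obtain ⟨t, ht, _⟩ := h
      intro r hr
      rcases List.mem_cons.mp hr with hr | hr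
      · simp [hr]
      · exact ih ht r hr

theorem pvTails_sum_le (xs : List (List String)) :
    ((xs.map List.tail).map List.length).sum ≤ (xs.map List.length).sum := by
  induction xs with
  | nil => simp
  | cons y ys ihy =>
    have hy : y.tail.length ≤ y.length := by cases y <;> simp
    simp only [List.map_cons, List.sum_cons]
    omega

theorem pvTails_sum_lt (rows : List (List String)) (hne : rows ≠ [])
    (hall : ∀ r ∈ rows, r ≠ []) :
    ((rows.map List.tail).map List.length).sum < (rows.map List.length).sum := by
  cases rows with
  | nil => exact absurd rfl hne
  | cons x xs =>
    have hx : x ≠ [] := hall x (by simp)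
    have hxlen : x.tail.length < x.length := by
      cases x with
      | nil => exact absurd rfl hx
      | cons a as => simp
    have hrest := pvTails_sum_le xs
    simp only [List.map_cons, List.sum_cons]
    omega

-- zip(*array): collect heads row by row until some row runs out
def pvZipStar (rows : List (List String)) : List (List String) :=
  if hne : rows = [] then []
  else
    match hh : pvHeads? rows with
    | none => []
    | some hs => hs :: pvZipStar (rows.map List.tail)
termination_by (rows.map List.length).sum
decreasing_by simpa using pvTails_sum_lt rows hne (pvHeads?_some_ne_nil hh)

def transpose_and_extract_text (array : List (List String)) : String :=
  (pvZipStar array).foldl (fun sentence row =>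
    row.foldl (fun sentence element =>
      if element = "0" then sentence ++ " "
      else if element ≠ "&" then sentence ++ element
      else sentence) sentence) ""

-- ===== PORT B =====
def transpose_and_extract_text_alt (array : List (List String)) : String :=
  String.join
    (array.foldl (fun buckets r =>
      (List.range (match array.map List.length with
          | [] => 0
          | h :: t => t.foldl min h)).foldl (fun buckets j =>
        if r.getD j "" = "0" then buckets.set j (buckets.getD j "" ++ " ")
        else if r.getD j "" ≠ "&" then buckets.set j (buckets.getD j "" ++ r.getD j "")
        else buckets) buckets)
      (List.replicate (match array.map List.length with
        | [] => 0
        | h :: t => t.foldl min h) ""))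

-- ===== PRECONDITION & SPEC =====
def Spec_transpose_and_extract_text (array : List (List String)) (out : String) : Prop := out = transpose_and_extract_text_alt array
instance (array : List (List String)) (out : String) : Decidable (Spec_transpose_and_extract_text array out) := by unfold Spec_transpose_and_extract_text; infer_instance

-- ===== CLAIM (what is proved, stated in full; the proofs are below) =====
def Claim_equal_transpose_and_extract_text : Prop := ∀ (array : List (List String)), Dom_transpose_and_extract_text array → Spec_transpose_and_extract_text array (transpose_and_extract_text array)

-- ===== LEMMAS AND PROOFS =====

-- what one grid cell contributes to the output
def pvEmit (e : String) : String :=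
  if e = "0" then " " else if e ≠ "&" then e else ""

-- B's column count (identical to the match in the port of B)
def pvCols (rows : List (List String)) : Nat :=
  match rows.map List.length with
  | [] => 0
  | h :: t => t.foldl min h

theorem pv_foldl_join : ∀ (l : List String) (s : String),
    l.foldl (· ++ ·) s = s ++ String.join l := by
  intro l
  induction l with
  | nil => intro s; simp [String.join]
  | cons x xs ih =>
    intro s
    rw [List.foldl_cons, ih]
    have hx : String.join (x :: xs) = x ++ String.join xs := by
      show (x :: xs).foldl (· ++ ·) "" = _
      rw [List.foldl_cons, ih, String.empty_append]
    rw [hx, String.append_assoc]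

theorem pv_join_cons (x : String) (xs : List String) :
    String.join (x :: xs) = x ++ String.join xs := by
  show (x :: xs).foldl (· ++ ·) "" = _
  rw [List.foldl_cons, pv_foldl_join, String.empty_append]

-- A's inner loop over one transposed row
theorem pvA_inner : ∀ (row : List String) (s : String),
    row.foldl (fun sentence element =>
      if element = "0" then sentence ++ " "
      else if element ≠ "&" then sentence ++ element
      else sentence) s = s ++ String.join (row.map pvEmit) := by
  intro row
  induction row with
  | nil => intro s; simp [String.join]
  | cons e es ih =>
    intro s
    rw [List.foldl_cons, List.map_cons, pv_join_cons]
    by_cases h1 : e = "0"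
    · rw [if_pos h1, ih, show pvEmit e = " " from by simp [pvEmit, h1],
        String.append_assoc]
    · by_cases h2 : e = "&"
      · rw [if_neg h1, if_neg (not_not_intro h2), ih,
          show pvEmit e = "" from by simp [pvEmit, h1, h2], String.empty_append]
      · rw [if_neg h1, if_pos h2, ih,
          show pvEmit e = e from by simp [pvEmit, h1, h2], String.append_assoc]

theorem pvA_outer : ∀ (rows : List (List String)) (s : String),
    rows.foldl (fun sentence row =>
      row.foldl (fun sentence element =>
        if element = "0" then sentence ++ " "
        else if element ≠ "&" then sentence ++ element
        else sentence) sentence) s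
    = s ++ String.join (rows.map (fun row => String.join (row.map pvEmit))) := by
  intro rows
  induction rows with
  | nil => intro s; simp [String.join]
  | cons r rs ih =>
    intro s
    rw [List.foldl_cons, ih, pvA_inner, List.map_cons, pv_join_cons,
      String.append_assoc]

-- helper facts about set/getD on bucket lists
theorem pv_getD_set_self (b : List String) (j : Nat) (x : String) (h : j < b.length) :
    (b.set j x).getD j "" = x := by
  simp [List.getD, List.getElem?_set_self', h]

theorem pv_getD_set_ne (b : List String) (j k : Nat) (x : String) (h : k ≠ j) :
    (b.set j x).getD k "" = b.getD k "" := by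
  simp [List.getD, List.getElem?_set_ne (Ne.symm h)]

-- B's inner loop: each index j in js gets pvEmit appended at bucket j
theorem pvB_inner (r : List String) : ∀ (js : List Nat) (b : List String),
    js.Nodup → (∀ j ∈ js, j < b.length) →
    (js.foldl (fun buckets j =>
        if r.getD j "" = "0" then buckets.set j (buckets.getD j "" ++ " ")
        else if r.getD j "" ≠ "&" then buckets.set j (buckets.getD j "" ++ r.getD j "")
        else buckets) b).length = b.length ∧
    ∀ k, (js.foldl (fun buckets j =>
        if r.getD j "" = "0" then buckets.set j (buckets.getD j "" ++ " ")
        else if r.getD j "" ≠ "&" then buckets.set j (buckets.getD j "" ++ r.getD j "")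
        else buckets) b).getD k ""
      = if k ∈ js then b.getD k "" ++ pvEmit (r.getD k "") else b.getD k "" := by
  intro js
  induction js with
  | nil => intro b _ _; exact ⟨rfl, fun k => by simp⟩
  | cons j js ih =>
    intro b hnd hlt
    have hjb : j < b.length := hlt j (by simp)
    have hstep :
        (if r.getD j "" = "0" then b.set j (b.getD j "" ++ " ")
         else if r.getD j "" ≠ "&" then b.set j (b.getD j "" ++ r.getD j "")
         else b).length = b.length ∧
        ∀ k, (if r.getD j "" = "0" then b.set j (b.getD j "" ++ " ")
         else if r.getD j "" ≠ "&" then b.set j (b.getD j "" ++ r.getD j "")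
         else b).getD k ""
          = if k = j then b.getD k "" ++ pvEmit (r.getD k "") else b.getD k "" := by
      by_cases h1 : r.getD j "" = "0"
      · rw [if_pos h1]
        refine ⟨List.length_set .., fun k => ?_⟩
        by_cases hk : k = j
        · subst hk
          rw [if_pos rfl, pv_getD_set_self _ _ _ hjb,
            show pvEmit (r.getD k "") = " " from by unfold pvEmit; rw [if_pos h1]]
        · rw [if_neg hk, pv_getD_set_ne _ _ _ _ hk]
      · by_cases h2 : r.getD j "" = "&"
        · rw [if_neg h1, if_neg (not_not_intro h2)]
          refine ⟨rfl, fun k => ?_⟩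
          by_cases hk : k = j
          · subst hk
            rw [if_pos rfl,
              show pvEmit (r.getD k "") = "" from by unfold pvEmit; rw [if_neg h1, if_neg (not_not_intro h2)]]
            exact String.append_empty.symm
          · rw [if_neg hk]
        · rw [if_neg h1, if_pos h2]
          refine ⟨List.length_set .., fun k => ?_⟩
          by_cases hk : k = j
          · subst hk
            rw [if_pos rfl, pv_getD_set_self _ _ _ hjb,
              show pvEmit (r.getD k "") = r.getD k "" from by unfold pvEmit; rw [if_neg h1, if_pos h2]]
          · rw [if_neg hk, pv_getD_set_ne _ _ _ _ hk]
    rw [List.foldl_cons]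
    set b1 := (if r.getD j "" = "0" then b.set j (b.getD j "" ++ " ")
         else if r.getD j "" ≠ "&" then b.set j (b.getD j "" ++ r.getD j "")
         else b) with hb1
    have hnd' := (List.nodup_cons.mp hnd)
    have ihres := ih b1 hnd'.2 (fun i hi => by rw [hstep.1]; exact hlt i (by simp [hi]))
    refine ⟨by rw [ihres.1, hstep.1], fun k => ?_⟩
    rw [ihres.2 k]
    by_cases hkjs : k ∈ js
    · have hkj : k ≠ j := fun h => hnd'.1 (h ▸ hkjs)
      rw [if_pos hkjs, hstep.2 k, if_neg hkj, if_pos (by simp [hkjs])]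
    · rw [if_neg hkjs, hstep.2 k]
      by_cases hkj : k = j
      · rw [if_pos hkj, if_pos (by simp [hkj])]
      · rw [if_neg hkj, if_neg (by simp [hkj, hkjs])]

-- B's outer loop over the rows
theorem pvB_outer (cols : Nat) : ∀ (rows : List (List String)) (b : List String),
    b.length = cols →
    (rows.foldl (fun buckets r =>
      (List.range cols).foldl (fun buckets j =>
        if r.getD j "" = "0" then buckets.set j (buckets.getD j "" ++ " ")
        else if r.getD j "" ≠ "&" then buckets.set j (buckets.getD j "" ++ r.getD j "")
        else buckets) buckets) b).length = cols ∧
    ∀ k, k < cols →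
    (rows.foldl (fun buckets r =>
      (List.range cols).foldl (fun buckets j =>
        if r.getD j "" = "0" then buckets.set j (buckets.getD j "" ++ " ")
        else if r.getD j "" ≠ "&" then buckets.set j (buckets.getD j "" ++ r.getD j "")
        else buckets) buckets) b).getD k ""
      = b.getD k "" ++ String.join (rows.map (fun r => pvEmit (r.getD k ""))) := by
  intro rows
  induction rows with
  | nil =>
    intro b hb
    exact ⟨hb, fun k _ => by simp [String.join]⟩
  | cons r rs ih =>
    intro b hb
    have hinner := pvB_inner r (List.range cols) b (List.nodup_range)
      (fun j hj => by rw [hb]; exact List.mem_range.mp hj)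
    rw [List.foldl_cons]
    have ihres := ih _ (by rw [hinner.1, hb])
    refine ⟨ihres.1, fun k hk => ?_⟩
    rw [ihres.2 k hk, hinner.2 k, if_pos (List.mem_range.mpr hk), List.map_cons,
      pv_join_cons, String.append_assoc]

-- min-related facts about pvCols and pvZipStar
theorem pv_foldl_min_mem : ∀ (l : List Nat) (h : Nat), l.foldl min h ∈ h :: l := by
  intro l
  induction l with
  | nil => intro h; simp
  | cons a as ih =>
    intro h
    have H := ih (min h a)
    rw [List.foldl_cons]
    rcases List.mem_cons.mp H with h1 | h1
    · rw [h1]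
      rcases Nat.le_total h a with hle | hle
      · simp [Nat.min_eq_left hle]
      · simp [Nat.min_eq_right hle]
    · exact List.mem_cons_of_mem _ (List.mem_cons_of_mem _ h1)

theorem pv_foldl_min_le : ∀ (l : List Nat) (h x : Nat), x ∈ h :: l → l.foldl min h ≤ x := by
  intro l
  induction l with
  | nil =>
    intro h x hx
    rw [List.foldl_nil]
    simp at hx
    omega
  | cons a as ih =>
    intro h x hx
    rw [List.foldl_cons]
    have hmin : as.foldl min (min h a) ≤ min h a := ih _ _ (by simp)
    rcases List.mem_cons.mp hx with h1 | h1
    · subst h1; omega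
    · rcases List.mem_cons.mp h1 with h2 | h2
      · subst h2; omega
      · exact ih (min h a) x (List.mem_cons_of_mem _ h2)

theorem pvCols_le {rows : List (List String)} {r : List String} (hr : r ∈ rows) :
    pvCols rows ≤ r.length := by
  cases rows with
  | nil => cases hr
  | cons x xs =>
    have hmem : r.length ∈ x.length :: xs.map List.length := by
      rcases List.mem_cons.mp hr with h | h
      · simp [h]
      · exact List.mem_cons_of_mem _ (List.mem_map_of_mem h)
    simpa [pvCols] using pv_foldl_min_le (xs.map List.length) x.length r.length hmem

theorem pvCols_mem {rows : List (List String)} (hne : rows ≠ []) :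
    ∃ r ∈ rows, pvCols rows = r.length := by
  cases rows with
  | nil => exact absurd rfl hne
  | cons x xs =>
    have H := pv_foldl_min_mem (xs.map List.length) x.length
    rcases List.mem_cons.mp H with h | h
    · exact ⟨x, by simp, by simpa [pvCols] using h⟩
    · obtain ⟨r, hr, hlen⟩ := List.mem_map.mp h
      exact ⟨r, by simp [hr], by simp [pvCols, hlen.symm]⟩

theorem pvHeads?_none {rows : List (List String)} {r : List String}
    (hr : r ∈ rows) (hnil : r = []) : pvHeads? rows = none := by
  induction rows with
  | nil => cases hr
  | cons x xs ih =>
    rcases List.mem_cons.mp hr with h | h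
    · subst hnil; rw [← h]; simp [pvHeads?]
    · cases x with
      | nil => simp [pvHeads?]
      | cons a as => simp [pvHeads?, ih h]

theorem pvHeads?_all {rows : List (List String)} (hall : ∀ r ∈ rows, r ≠ []) :
    pvHeads? rows = some (rows.map (fun r => r.getD 0 "")) := by
  induction rows with
  | nil => simp [pvHeads?]
  | cons x xs ih =>
    cases x with
    | nil => exact absurd rfl (hall [] (by simp))
    | cons a as =>
      simp [pvHeads?, ih (fun r hr => hall r (by simp [hr]))]

theorem pv_foldl_min_sub : ∀ (l : List Nat) (h : Nat),
    (l.map (· - 1)).foldl min (h - 1) = l.foldl min h - 1 := by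
  intro l
  induction l with
  | nil => intro h; simp
  | cons a as ih =>
    intro h
    simp only [List.map_cons, List.foldl_cons]
    rw [show min (h - 1) (a - 1) = min h a - 1 from by omega, ih]

theorem pvCols_tail {rows : List (List String)}
    (hall : ∀ r ∈ rows, r ≠ []) :
    pvCols (rows.map List.tail) = pvCols rows - 1 := by
  cases rows with
  | nil => simp [pvCols]
  | cons x xs =>
    have hlen : ∀ (r : List String), r ∈ x :: xs → r.tail.length = r.length - 1 := by
      intro r hr; cases r with
      | nil => exact absurd rfl (hall [] hr)
      | cons b bs => simp
    simp only [pvCols, List.map_cons, List.map_map, Function.comp_def]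
    have hmap : xs.map (fun r => r.tail.length) = (xs.map List.length).map (· - 1) := by
      rw [List.map_map]
      exact List.map_congr_left (fun r hr => hlen r (by simp [hr]))
    rw [hmap, hlen x (by simp), pv_foldl_min_sub]

theorem pv_getD_succ {r : List String} (hr : r ≠ []) (j : Nat) :
    r.getD (j + 1) "" = r.tail.getD j "" := by
  cases r with
  | nil => exact absurd rfl hr
  | cons a as => simp

theorem pvZipStar_eq_aux : ∀ (n : Nat) (rows : List (List String)), pvCols rows = n →
    pvZipStar rows = (List.range n).map (fun j => rows.map (fun r => r.getD j "")) := by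
  intro n
  induction n with
  | zero =>
    intro rows hc
    cases hrows : rows with
    | nil => rw [pvZipStar]; simp
    | cons x xs =>
      subst hrows
      obtain ⟨r, hr, hlen⟩ := pvCols_mem (rows := x :: xs) (by simp)
      have hrnil : r = [] := by
        cases r with
        | nil => rfl
        | cons b bs => rw [hc] at hlen; simp at hlen
      rw [pvZipStar, dif_neg (List.cons_ne_nil x xs)]
      split
      · simp
      · next hs heq =>
          rw [pvHeads?_none hr hrnil] at heq
          cases heq
  | succ n ih =>
    intro rows hc
    have hne : rows ≠ [] := by
      intro h; subst h; simp [pvCols] at hc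
    have hall : ∀ r ∈ rows, r ≠ [] := by
      intro r hr hnil
      have := pvCols_le hr
      rw [hnil, hc] at this
      simp at this
    have hheads := pvHeads?_all hall
    have htail : pvCols (rows.map List.tail) = n := by
      rw [pvCols_tail hall, hc]
      omega
    rw [pvZipStar, dif_neg hne]
    split
    · next heq => rw [hheads] at heq; cases heq
    · next hs heq =>
        rw [hheads] at heq
        injection heq with h
        subst h
        rw [ih (rows.map List.tail) htail, List.range_succ_eq_map, List.map_cons,
          List.map_map]
        congr 1
        refine List.map_congr_left (fun j _ => ?_)
        simp only [Function.comp_def, List.map_map]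
        refine List.map_congr_left (fun r hr => ?_)
        exact (pv_getD_succ (hall r hr) j).symm

theorem pvZipStar_eq (rows : List (List String)) :
    pvZipStar rows = (List.range (pvCols rows)).map (fun j => rows.map (fun r => r.getD j "")) :=
  pvZipStar_eq_aux (pvCols rows) rows rfl

-- B's final bucket list equals the per-column join, as a list
theorem pvB_buckets (array : List (List String)) :
    (array.foldl (fun buckets r =>
      (List.range (pvCols array)).foldl (fun buckets j =>
        if r.getD j "" = "0" then buckets.set j (buckets.getD j "" ++ " ")
        else if r.getD j "" ≠ "&" then buckets.set j (buckets.getD j "" ++ r.getD j "")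
        else buckets) buckets)
      (List.replicate (pvCols array) ""))
    = (List.range (pvCols array)).map
        (fun j => String.join (array.map (fun r => pvEmit (r.getD j "")))) := by
  have H := pvB_outer (pvCols array) array (List.replicate (pvCols array) "")
    (List.length_replicate)
  refine List.ext_getElem (by rw [H.1]; simp) ?_
  intro k hk hk2
  have hkc : k < pvCols array := by rw [H.1] at hk; exact hk
  have hgd := H.2 k hkc
  rw [List.getD_eq_getElem?_getD, List.getElem?_eq_getElem hk] at hgd
  simp only [Option.getD_some] at hgd
  rw [hgd, List.getElem_map, List.getElem_range,
    List.getD_eq_getElem?_getD, List.getElem?_eq_getElem (by simpa using hkc)]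
  simp [String.empty_append]

-- ===== VERDICT (by name: the statement is the Claim_ definition above) =====
theorem transpose_and_extract_text_spec : Claim_equal_transpose_and_extract_text := by
  intro array _
  unfold Spec_transpose_and_extract_text
  simp only [transpose_and_extract_text, transpose_and_extract_text_alt]
  rw [pvA_outer, pvZipStar_eq, String.empty_append]
  rw [show (match array.map List.length with
      | [] => 0
      | h :: t => t.foldl min h) = pvCols array from rfl]
  rw [pvB_buckets, List.map_map]
  congr 1
  refine List.map_congr_left (fun j _ => ?_)
  simp only [Function.comp_def, List.map_map]
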